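-- pv_equiv track=rewrite | github.com/chuoer47/AlgorithmLearning | 刷题记录/LeetCode/周赛/第484场周赛/3806. 增加操作后最大按位与的结果.py | maximumAND
-- ===== SOURCE A (Python) =====
-- from typing import List
--
-- def maximumAND(nums: List[int], k: int, m: int) -> int:
--     ans = 0
--     n = len(nums)
--     cost = [0] * n
--     for bit in range(32, -1, -1):
--         target = ans | (1 << bit)
--         for i, v in enumerate(nums):
--             # 找到第j为不匹配的bit
--             j = (target & ~v).bit_length()
--             mask = (1 << j) - 1
--             cost[i] = (target & mask) - (v & mask)
--         cost.sort()
--         if sum(cost[:m]) <= k: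
--             ans = target
--     return ans
-- ===== SOURCE B (Python) =====
-- from typing import List
--
-- def _cost(target: int, v: int) -> int:
--     # smallest increment making v match target on target's set bits
--     j = (target & ~v).bit_length()
--     mask = (1 << j) - 1
--     return (target & mask) - (v & mask)
--
-- def _sum_smallest(xs: List[int], m: int) -> int:
--     # sum of the min(m, len(xs)) smallest elements of xs, by quickselect-style
--     # three-way partitioning (no sort)
--     m = min(m, len(xs))
--     total = 0
--     while m > 0:
--         p = xs[len(xs) // 2]
--         lows = [x for x in xs if x < p]
--         highs = [x for x in xs if x > p]
--         ne = len(xs) - len(lows) - len(highs)   # pivot multiplicity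
--         if m <= len(lows):
--             xs = lows
--         elif m <= len(lows) + ne:
--             return total + sum(lows) + (m - len(lows)) * p
--         else:
--             total += sum(lows) + ne * p
--             m -= len(lows) + ne
--             xs = highs
--     return total
--
-- def maximumAND(nums: List[int], k: int, m: int) -> int:
--     ans = 0
--     for bit in range(32, -1, -1):
--         target = ans | (1 << bit)
--         costs = [_cost(target, v) for v in nums]
--         if _sum_smallest(costs, m) <= k:
--             ans = target
--     return ans
-- ===== Notes on version B (the rewrite author's own statement) =====
-- stated objective: alternative
-- what changed: B replaces A's per-bit full sort of the cost array (followed by summing the first m entries) with a quickselect-style three-way-partition selection of the sum of the m smallest costs; Pre_ excludes negative m (a negative count, outside the natural domain), where A's value comes from Python's negative-slice semantics of cost[:m].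
-- outside the precondition, e.g. on maximumAND([1, 2], 0, -1): A returns 2, B returns 8589934591
import Mathlib
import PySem

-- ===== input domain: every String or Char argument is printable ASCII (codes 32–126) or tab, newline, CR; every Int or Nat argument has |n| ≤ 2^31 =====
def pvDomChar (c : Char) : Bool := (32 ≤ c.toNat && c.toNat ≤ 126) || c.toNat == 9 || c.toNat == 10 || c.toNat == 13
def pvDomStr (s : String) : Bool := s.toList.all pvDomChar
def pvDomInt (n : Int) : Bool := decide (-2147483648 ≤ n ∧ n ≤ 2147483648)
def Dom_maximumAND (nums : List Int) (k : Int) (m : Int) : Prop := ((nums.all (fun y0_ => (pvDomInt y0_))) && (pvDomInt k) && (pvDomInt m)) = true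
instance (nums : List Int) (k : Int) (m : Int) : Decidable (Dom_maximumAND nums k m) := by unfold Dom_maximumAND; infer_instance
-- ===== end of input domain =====

-- B replaces A's per-bit full sort of the cost array by a quickselect-style
-- three-way-partition selection of the sum of the m smallest costs (alternative
-- algorithm; equivalence of the RETURN value is proved — A's sorted `cost` array
-- is local and not observable by the caller).

-- cost of raising v until it matches target on target's set bits
-- (identical arithmetic in both Pythons: j = (target & ~v).bit_length(); mask = (1<<j)-1)
def pvCost (target v : Int) : Int :=
  let j := PySem.Int.bitLength (PySem.Int.band target (Int.not v))
  let mask := (1 : Int) <<< j - 1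
  PySem.Int.band target mask - PySem.Int.band v mask

-- ===== PORT A =====
-- body of A's `for bit in range(32, -1, -1)` loop; state = (ans, cost)
def pvStepA (nums : List Int) (k m : Int) (s : Int × List Int) (bit : Int) : Int × List Int :=
  let target := PySem.Int.bor s.1 ((1 : Int) <<< bit.toNat)
  -- for i, v in enumerate(nums): cost[i] = ...
  let cost := (PySem.List.enumerate nums).foldl
    (fun c iv => c.set iv.1.toNat (pvCost target iv.2)) s.2
  let cost := PySem.List.sorted cost (fun y => y) false     -- cost.sort()
  if (PySem.List.slice cost none (some m)).sum ≤ k then (target, cost) else (s.1, cost)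

def maximumAND (nums : List Int) (k : Int) (m : Int) : Int :=
  let n := nums.length
  ((PySem.List.pyRange 32 (-1) (-1)).foldl (pvStepA nums k m) (0, List.replicate n 0)).1

-- ===== PORT B =====
-- termination fact for pvSelectSum (the partitions drop the pivot)
theorem pv_filter_lt {p : Int → Bool} {l : List Int} {x : Int} (hx : x ∈ l)
    (hpx : p x = false) : (l.filter p).length < l.length := by
  have h1 : (l.filter p).length ≤ l.length := List.length_filter_le _ _
  have h2 : (l.filter p).length ≠ l.length := by
    intro he
    have hall := (List.length_filter_eq_length_iff).mp he x hx
    simp [hpx] at hall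
  omega

theorem pv_pivot_mem (x : Int) (t : List Int) :
    (x :: t).getD ((x :: t).length / 2) 0 ∈ (x :: t) := by
  have hlt : (x :: t).length / 2 < (x :: t).length := by
    have : 0 < (x :: t).length := by simp
    omega
  rw [List.getD_eq_getElem _ 0 hlt]
  exact List.getElem_mem hlt

-- the while-loop of _sum_smallest: sum of the mN smallest elements (mN ≤ len)
def pvSelectSum : List Int → Nat → Int
  | _, 0 => 0
  | [], _ + 1 => 0          -- unreachable: the caller clamps mN to the length
  | x :: t, mp + 1 =>
    let p := (x :: t).getD ((x :: t).length / 2) 0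
    let lows := (x :: t).filter (fun y => y < p)
    let highs := (x :: t).filter (fun y => p < y)
    let ne := (x :: t).length - lows.length - highs.length
    if mp + 1 ≤ lows.length then pvSelectSum lows (mp + 1)
    else if mp + 1 ≤ lows.length + ne then
      lows.sum + ((mp + 1 - lows.length : Nat) : Int) * p
    else lows.sum + (ne : Int) * p + pvSelectSum highs (mp + 1 - lows.length - ne)
termination_by xs _ => xs.length
decreasing_by
  · exact pv_filter_lt (pv_pivot_mem x t) (by simp)
  · exact pv_filter_lt (pv_pivot_mem x t) (by simp)

-- _sum_smallest(xs, m): m = min(m, len(xs)), then the partition loop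
def pvSumSmallest (xs : List Int) (m : Int) : Int :=
  pvSelectSum xs (min m (xs.length : Int)).toNat

-- body of B's bit loop
def pvStepB (nums : List Int) (k m : Int) (ans : Int) (bit : Int) : Int :=
  let target := PySem.Int.bor ans ((1 : Int) <<< bit.toNat)
  let costs := nums.map (fun v => pvCost target v)
  if pvSumSmallest costs m ≤ k then target else ans

def maximumAND_alt (nums : List Int) (k : Int) (m : Int) : Int :=
  (PySem.List.pyRange 32 (-1) (-1)).foldl (pvStepB nums k m) 0

-- ===== PRECONDITION & SPEC =====
-- Pre_ excludes only negative m (a negative count, outside the natural domain);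
-- there A still returns a value, via Python's negative-slice reading of cost[:m].
def Pre_maximumAND (nums : List Int) (k : Int) (m : Int) : Prop := 0 ≤ m
instance (nums : List Int) (k : Int) (m : Int) : Decidable (Pre_maximumAND nums k m) := by unfold Pre_maximumAND; infer_instance
def pvWitness_maximumAND : List Int × Int × Int := ([1, 2, 3], 2, 1)

def Spec_maximumAND (nums : List Int) (k : Int) (m : Int) (out : Int) : Prop := out = maximumAND_alt nums k m
instance (nums : List Int) (k : Int) (m : Int) (out : Int) : Decidable (Spec_maximumAND nums k m out) := by unfold Spec_maximumAND; infer_instance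

-- ===== CLAIM (what is proved, stated in full; the proofs are below) =====
def Claim_equal_maximumAND : Prop := ∀ (nums : List Int) (k : Int) (m : Int), Dom_maximumAND nums k m → Pre_maximumAND nums k m → Spec_maximumAND nums k m (maximumAND nums k m)

-- ===== LEMMAS AND PROOFS =====

-- A's index-assignment loop over enumerate(nums) rebuilds the whole cost array
theorem pv_fold_set (f : Int → Int) :
    ∀ (suf pre rest : List Int), rest.length = suf.length →
    (PySem.List.enumerate suf (pre.length : Int)).foldl
      (fun c iv => c.set iv.1.toNat (f iv.2)) (pre ++ rest) = pre ++ suf.map f := by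
  intro suf
  induction suf with
  | nil => intro pre rest h; simp at h; simp [PySem.List.enumerate, h]
  | cons v vs ih =>
    intro pre rest h
    match rest with
    | r :: rs =>
      simp only [PySem.List.enumerate_cons, List.foldl_cons, Int.toNat_natCast]
      have hset : (pre ++ r :: rs).set pre.length (f v) = (pre ++ [f v]) ++ rs := by
        rw [List.set_append_right _ _ (le_refl _)]
        simp
      rw [hset]
      have hlen : ((pre.length : Int) + 1) = ((pre ++ [f v]).length : Int) := by simp
      rw [hlen, ih (pre ++ [f v]) rs (by simpa using h)]
      simp

theorem pv_partition_perm (xs : List Int) (p : Int) :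
    ((xs.filter (fun y => y < p)) ++ ((xs.filter (fun y => y = p)) ++ (xs.filter (fun y => p < y)))).Perm xs := by
  induction xs with
  | nil => simp
  | cons a t ih =>
    simp only [List.filter_cons, decide_eq_true_eq]
    rcases lt_trichotomy a p with h | h | h
    · rw [if_pos h, if_neg (by omega : ¬ a = p), if_neg (by omega : ¬ p < a)]
      exact ih.cons a
    · rw [if_neg (by omega : ¬ a < p), if_pos h, if_neg (by omega : ¬ p < a)]
      exact List.Perm.trans List.perm_middle (ih.cons a)
    · rw [if_neg (by omega : ¬ a < p), if_neg (by omega : ¬ a = p), if_pos h]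
      rw [show (t.filter (fun y => decide (y < p))) ++ ((t.filter (fun y => decide (y = p))) ++ a :: (t.filter (fun y => decide (p < y))))
            = ((t.filter (fun y => decide (y < p))) ++ (t.filter (fun y => decide (y = p)))) ++ a :: (t.filter (fun y => decide (p < y)))
          from (List.append_assoc _ _ _).symm]
      refine List.Perm.trans List.perm_middle ?_
      rw [List.append_assoc]
      exact ih.cons a

theorem pv_take_const_sum (p : Int) :
    ∀ (l : List Int), (∀ x ∈ l, x = p) → ∀ t, t ≤ l.length → (l.take t).sum = (t : Int) * p := by
  intro l
  induction l with
  | nil => intro _ t ht; simp at ht; simp [ht]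
  | cons a l ih =>
    intro h t ht
    match t with
    | 0 => simp
    | t + 1 =>
      simp only [List.take_succ_cons, List.sum_cons]
      rw [h a (by simp), ih (fun x hx => h x (by simp [hx])) t (by simpa using ht)]
      push_cast; ring

-- sorted decomposition around a pivot
theorem pv_sorted_decomp (xs : List Int) (p : Int) :
    PySem.List.sorted xs (fun y => y) false =
      (PySem.List.sorted (xs.filter (fun y => y < p)) (fun y => y) false) ++
      ((xs.filter (fun y => y = p)) ++ (PySem.List.sorted (xs.filter (fun y => p < y)) (fun y => y) false)) := by
  apply PySem.List.sorted_id_eq_of_perm_of_pairwise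
  · exact List.Perm.trans
      (((PySem.List.sorted_perm _ _ _).append ((List.Perm.refl _).append (PySem.List.sorted_perm _ _ _))))
      (pv_partition_perm xs p)
  · rw [List.pairwise_append]
    refine ⟨PySem.List.sorted_pairwise _ _, ?_, ?_⟩
    · rw [List.pairwise_append]
      refine ⟨List.pairwise_of_forall_mem_list ?_, PySem.List.sorted_pairwise _ _, ?_⟩
      · intro a ha b hb
        simp only [List.mem_filter, decide_eq_true_eq] at ha hb
        omega
      · intro a ha b hb
        rw [PySem.List.mem_sorted] at hb
        simp only [List.mem_filter, decide_eq_true_eq] at ha hb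
        omega
    · intro a ha b hb
      rw [PySem.List.mem_sorted] at ha
      simp only [List.mem_filter, decide_eq_true_eq] at ha
      rcases List.mem_append.mp hb with hb | hb
      · simp only [List.mem_filter, decide_eq_true_eq] at hb
        omega
      · rw [PySem.List.mem_sorted] at hb
        simp only [List.mem_filter, decide_eq_true_eq] at hb
        omega

theorem pv_selectSum_eq : ∀ (N : Nat) (xs : List Int), xs.length ≤ N → ∀ mN : Nat, mN ≤ xs.length →
    pvSelectSum xs mN = ((PySem.List.sorted xs (fun y => y) false).take mN).sum := by
  intro N
  induction N with
  | zero =>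
    intro xs hx mN hm
    have : xs = [] := by cases xs <;> simp_all
    subst this
    simp at hm
    subst hm
    simp [pvSelectSum]
  | succ N ih =>
    intro xs hx mN hm
    match xs, mN with
    | xs, 0 => simp [pvSelectSum]
    | x :: t, mp + 1 =>
      set p := (x :: t).getD ((x :: t).length / 2) 0 with hp
      set lows := (x :: t).filter (fun y => y < p) with hlows
      set eqs := (x :: t).filter (fun y => y = p) with heqs
      set highs := (x :: t).filter (fun y => p < y) with hhighs
      have hperm := pv_partition_perm (x :: t) p
      have hlen : lows.length + (eqs.length + highs.length) = (x :: t).length := by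
        simpa using hperm.length_eq
      have hpm : p ∈ (x :: t) := pv_pivot_mem x t
      have hdecomp := pv_sorted_decomp (x :: t) p
      have hlowlt : lows.length < (x :: t).length :=
        pv_filter_lt hpm (by simp)
      have hhighlt : highs.length < (x :: t).length :=
        pv_filter_lt hpm (by simp)
      have hne : (x :: t).length - lows.length - highs.length = eqs.length := by omega
      rw [pvSelectSum]
      simp only [← hp, ← hlows, ← hhighs, hne]
      by_cases h1 : mp + 1 ≤ lows.length
      · rw [if_pos h1, hdecomp]
        rw [List.take_append_of_le_length (by rw [PySem.List.length_sorted]; exact h1)]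
        exact ih lows (by omega) (mp + 1) h1
      · rw [if_neg h1]
        have heqmem : ∀ y ∈ eqs, y = p := by
          intro y hy
          simp only [heqs, List.mem_filter, decide_eq_true_eq] at hy
          exact hy.2
        by_cases h2 : mp + 1 ≤ lows.length + eqs.length
        · rw [if_pos h2, hdecomp]
          have hmp : mp + 1 = (PySem.List.sorted lows (fun y => y) false).length + (mp + 1 - lows.length) := by
            rw [PySem.List.length_sorted]; omega
          conv_rhs => rw [hmp, List.take_length_add_append,
            List.take_append_of_le_length (by omega : mp + 1 - lows.length ≤ eqs.length)]
          rw [List.sum_append, (PySem.List.sorted_perm lows _ _).sum_eq,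
              pv_take_const_sum p eqs heqmem (mp + 1 - lows.length) (by omega)]
        · rw [if_neg h2, hdecomp]
          have hmp : mp + 1 = (PySem.List.sorted lows (fun y => y) false).length +
              (eqs.length + (mp + 1 - lows.length - eqs.length)) := by
            rw [PySem.List.length_sorted]; omega
          conv_rhs => rw [hmp, List.take_length_add_append, List.take_length_add_append]
          rw [List.sum_append, List.sum_append, (PySem.List.sorted_perm lows _ _).sum_eq]
          have heqsum : eqs.sum = (eqs.length : Int) * p := by
            have h3 := pv_take_const_sum p eqs heqmem eqs.length (le_refl _)
            simpa using h3
          rw [heqsum, ih highs (by omega) (mp + 1 - lows.length - eqs.length) (by simp at hlen hm ⊢; omega)]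
          ring

-- cost[:m] with 0 ≤ m is a take of min(m, len)
theorem pv_slice_eq_take (l : List Int) (m : Int) (hm : 0 ≤ m) :
    PySem.List.slice l none (some m) = l.take (min m (l.length : Int)).toNat := by
  obtain ⟨a, rfl⟩ : ∃ a : Nat, m = (a : Int) := ⟨m.toNat, by omega⟩
  rw [PySem.List.slice_to_natCast, List.take_eq_take_iff]
  omega

-- one bit-iteration: A's state step agrees with B's on ans, and the new cost
-- array is the sorted fresh cost array
theorem pv_step_fst (nums : List Int) (k m : Int) (hm : 0 ≤ m)
    (ans bit : Int) (cost : List Int) (hlen : cost.length = nums.length) :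
    pvStepA nums k m (ans, cost) bit =
      (pvStepB nums k m ans bit,
       PySem.List.sorted (nums.map (pvCost (PySem.Int.bor ans ((1 : Int) <<< bit.toNat)))) (fun y => y) false) := by
  unfold pvStepA pvStepB
  dsimp only
  have hfold : (PySem.List.enumerate nums).foldl
      (fun c iv => c.set iv.1.toNat (pvCost (PySem.Int.bor ans ((1 : Int) <<< bit.toNat)) iv.2)) cost
      = nums.map (pvCost (PySem.Int.bor ans ((1 : Int) <<< bit.toNat))) := by
    have h := pv_fold_set (pvCost (PySem.Int.bor ans ((1 : Int) <<< bit.toNat))) nums [] cost (by simpa using hlen)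
    simpa using h
  rw [hfold]
  set costs := nums.map (pvCost (PySem.Int.bor ans ((1 : Int) <<< bit.toNat))) with hcosts
  have hslice : PySem.List.slice (PySem.List.sorted costs (fun y => y) false) none (some m)
      = (PySem.List.sorted costs (fun y => y) false).take (min m (costs.length : Int)).toNat := by
    rw [pv_slice_eq_take _ m hm, PySem.List.length_sorted]
  have hsel : pvSumSmallest costs m
      = ((PySem.List.sorted costs (fun y => y) false).take (min m (costs.length : Int)).toNat).sum := by
    unfold pvSumSmallest
    exact pv_selectSum_eq costs.length costs (le_refl _) _ (by omega)
  rw [hslice, hsel]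
  split_ifs <;> rfl

-- main loop invariant: A's (ans, cost) fold and B's ans fold agree on ans
theorem pv_fold_bits (nums : List Int) (k m : Int) (hm : 0 ≤ m) :
    ∀ (bits : List Int) (ans : Int) (cost : List Int), cost.length = nums.length →
    (bits.foldl (pvStepA nums k m) (ans, cost)).1 = bits.foldl (pvStepB nums k m) ans := by
  intro bits
  induction bits with
  | nil => intro ans cost _; rfl
  | cons bit bits ih =>
    intro ans cost hlen
    rw [List.foldl_cons, List.foldl_cons, pv_step_fst nums k m hm ans bit cost hlen]
    exact ih _ _ (by rw [PySem.List.length_sorted, List.length_map])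

-- ===== VERDICT (by name: the statement is the Claim_ definition above) =====
theorem maximumAND_spec : Claim_equal_maximumAND := by
  intro nums k m _ hm
  unfold Spec_maximumAND maximumAND maximumAND_alt
  exact pv_fold_bits nums k m hm _ 0 (List.replicate nums.length 0) List.length_replicate
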